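-- pv_equiv track=rewrite | github.com/lucca-libanori/Maquina-de-estados-finitos | EstadosFinitos.py | regra
-- ===== SOURCE A (Python) =====
-- def regra(strings):
-- # Inicializando uma váriavel booleana,
-- # e identicando o tamanho das strings de entrada.
--     check = True
--     tamanho = len(strings)
--
--     for j in range(0, tamanho):
-- # Variavel x sendo utilizada para armazenar letra por letra
-- # da string de entrada.
--         x = strings[j]
-- # Condição criada para a checagem acontecer apenas
-- # no caso de letra 'a'
--         if x == 'a':
-- # Condição criada para evitar o erro de alcance.
--             if j == tamanho -1 or j == tamanho -2:
--                 check = False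
--                 return False
-- # Condição criada para checar se após a letra 'a', temos
-- # os dois b's em seguida.
--             if strings[j + 1] == 'b' and strings[j + 2] == 'b':
--                 check = True
--             else:
--                 check = False
--                 return False
--     return check
-- ===== SOURCE B (Python) =====
-- import re
--
-- def regra(strings):
--     # valid iff no 'a' that is NOT immediately followed by "bb"
--     return re.search(r'a(?!bb)', strings) is None
-- ===== Notes on version B (the rewrite author's own statement) =====
-- stated objective: idiomatic
-- what changed: Replaced the manual indexed scan with boundary-case branches by a single regex search for an 'a' not followed by 'bb' (re.search(r'a(?!bb)', strings) is None).
import Mathlib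
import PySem

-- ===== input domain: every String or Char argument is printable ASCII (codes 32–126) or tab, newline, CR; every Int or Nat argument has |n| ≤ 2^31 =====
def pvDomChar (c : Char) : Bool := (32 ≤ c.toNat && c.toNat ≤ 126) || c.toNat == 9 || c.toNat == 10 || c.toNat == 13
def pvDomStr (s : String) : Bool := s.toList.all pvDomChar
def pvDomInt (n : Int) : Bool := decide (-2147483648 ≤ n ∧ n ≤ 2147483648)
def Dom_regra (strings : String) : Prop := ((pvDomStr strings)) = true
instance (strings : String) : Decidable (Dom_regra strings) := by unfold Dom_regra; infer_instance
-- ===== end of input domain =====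

-- B replaces A's manual indexed scan by a regex-style search for an 'a' not followed by "bb" (idiomatic; same return values).


-- ===== PORT A =====
-- A's for-loop over range(0, tamanho) with early returns, transliterated as index recursion
-- carrying the `check` variable. All indexings are in range (guarded by A's own branches),
-- so List.getD is exact here.
def regraAux (cs : List Char) (tamanho : Nat) (j : Nat) (check : Bool) : Bool :=
  if _h : j < tamanho then
    let x := cs.getD j ' '
    if x = 'a' then
      if j = tamanho - 1 ∨ j = tamanho - 2 then
        false
      else
        if cs.getD (j + 1) ' ' = 'b' ∧ cs.getD (j + 2) ' ' = 'b' then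
          regraAux cs tamanho (j + 1) true
        else
          false
    else
      regraAux cs tamanho (j + 1) check
  else
    check
termination_by tamanho - j

def regra (strings : String) : Bool :=
  regraAux strings.toList strings.toList.length 0 true

-- ===== PORT B =====
-- port of re.search(r'a(?!bb)', strings): scan left to right for a position whose char is 'a'
-- with the negative lookahead "next two chars are not 'b','b'"; exact for this regex.
def lookaheadBB : List Char → Bool
  | c1 :: c2 :: _ => c1 = 'b' && c2 = 'b'
  | _ => false

def searchABad : List Char → Bool
  | [] => false
  | c :: rest => (c = 'a' && !lookaheadBB rest) || searchABad rest

def regra_alt (strings : String) : Bool :=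
  !searchABad strings.toList

-- ===== PRECONDITION & SPEC =====
def Spec_regra (strings : String) (out : Bool) : Prop := out = regra_alt strings
instance (strings : String) (out : Bool) : Decidable (Spec_regra strings out) := by unfold Spec_regra; infer_instance

-- ===== CLAIM (what is proved, stated in full; the proofs are below) =====
def Claim_equal_regra : Prop := ∀ (strings : String), Dom_regra strings → Spec_regra strings (regra strings)

-- ===== LEMMAS AND PROOFS =====

theorem regraAux_eq (k : Nat) : ∀ (cs : List Char) (j : Nat), j + k = cs.length →
    regraAux cs cs.length j true = !searchABad (cs.drop j) := by
  induction k with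
  | zero =>
    intro cs j hj
    have hge : ¬ j < cs.length := by omega
    rw [regraAux, dif_neg hge, List.drop_of_length_le (by omega)]
    rfl
  | succ k ih =>
    intro cs j hj
    have hlt : j < cs.length := by omega
    have hdrop : cs.drop j = cs[j] :: cs.drop (j + 1) := List.drop_eq_getElem_cons hlt
    have hgd : cs.getD j ' ' = cs[j] := List.getD_eq_getElem cs ' ' hlt
    rw [regraAux, dif_pos hlt, hdrop]
    simp only [hgd, searchABad]
    by_cases ha : cs[j] = 'a'
    · rw [if_pos ha, ha]
      by_cases hedge : j = cs.length - 1 ∨ j = cs.length - 2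
      · rw [if_pos hedge]
        -- the remaining suffix has length ≤ 1, so the lookahead fails: a match here
        have hlen : (cs.drop (j + 1)).length ≤ 1 := by
          rw [List.length_drop]; omega
        have hbb : lookaheadBB (cs.drop (j + 1)) = false := by
          match hcs : cs.drop (j + 1) with
          | [] => rfl
          | [c] => rfl
          | c1 :: c2 :: rest => rw [hcs] at hlen; simp at hlen
        simp [hbb]
      · rw [if_neg hedge]
        have h1 : j + 1 < cs.length := by omega
        have h2 : j + 2 < cs.length := by omega
        have hd1 : cs.drop (j + 1) = cs[j + 1] :: cs.drop (j + 2) := List.drop_eq_getElem_cons h1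
        have hd2 : cs.drop (j + 2) = cs[j + 2] :: cs.drop (j + 3) := List.drop_eq_getElem_cons h2
        have hg1 : cs.getD (j + 1) ' ' = cs[j + 1] := List.getD_eq_getElem cs ' ' h1
        have hg2 : cs.getD (j + 2) ' ' = cs[j + 2] := List.getD_eq_getElem cs ' ' h2
        by_cases hbs : cs[j + 1] = 'b' ∧ cs[j + 2] = 'b'
        · rw [if_pos (by rw [hg1, hg2]; exact hbs)]
          have hbb : lookaheadBB (cs.drop (j + 1)) = true := by
            rw [hd1, hd2]
            show (decide (cs[j+1] = 'b') && decide (cs[j+2] = 'b')) = true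
            simp [hbs.1, hbs.2]
          rw [ih cs (j + 1) (by omega)]
          simp [hbb]
        · rw [if_neg (by rw [hg1, hg2]; exact hbs)]
          have hbb : lookaheadBB (cs.drop (j + 1)) = false := by
            rw [hd1, hd2]
            show (decide (cs[j+1] = 'b') && decide (cs[j+2] = 'b')) = false
            rcases not_and_or.mp hbs with h | h <;> simp [h]
          simp [hbb]
    · rw [if_neg ha, ih cs (j + 1) (by omega)]
      simp [ha]

theorem regraAux_invariant (cs : List Char) :
    regraAux cs cs.length 0 true = !searchABad cs := by
  have h := regraAux_eq cs.length cs 0 (by omega)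
  rwa [List.drop_zero] at h

-- ===== VERDICT (by name: the statement is the Claim_ definition above) =====
theorem regra_spec : Claim_equal_regra := by
  intro strings _
  unfold Spec_regra regra regra_alt
  exact regraAux_invariant strings.toList
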